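-- pv_equiv track=rewrite | github.com/toki866/ApexTraderAI | tools/check_leak_equity_alignment.py | _detect_equity_col
-- ===== SOURCE A (Python) =====
-- from typing import List, Optional, Tuple
--
-- def _detect_equity_col(cols: List[str]) -> Optional[str]:
--     for c in cols:
--         if c.lower() in ("equity", "capital", "nav", "portfolio_value", "value"):
--             return c
--     for c in cols:
--         if "equity" in c.lower() or "capital" in c.lower() or "nav" in c.lower():
--             return c
--     return None
-- ===== SOURCE B (Python) =====
-- from typing import List, Optional
--
-- def _detect_equity_col(cols: List[str]) -> Optional[str]:
--     # single pass tracking the first exact match and the first substring match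
--     first_exact = None
--     first_substr = None
--     for c in cols:
--         lc = c.lower()
--         if first_exact is None and lc in ("equity", "capital", "nav", "portfolio_value", "value"):
--             first_exact = c
--         if first_substr is None and ("equity" in lc or "capital" in lc or "nav" in lc):
--             first_substr = c
--     return first_exact if first_exact is not None else first_substr
-- ===== Notes on version B (the rewrite author's own statement) =====
-- stated objective: alternative
-- what changed: Replaces A's two sequential scans (exact-keyword pass, then substring pass) with one pass that maintains two candidates, first_exact and first_substr, returning first_exact if set else first_substr.
import Mathlib
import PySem

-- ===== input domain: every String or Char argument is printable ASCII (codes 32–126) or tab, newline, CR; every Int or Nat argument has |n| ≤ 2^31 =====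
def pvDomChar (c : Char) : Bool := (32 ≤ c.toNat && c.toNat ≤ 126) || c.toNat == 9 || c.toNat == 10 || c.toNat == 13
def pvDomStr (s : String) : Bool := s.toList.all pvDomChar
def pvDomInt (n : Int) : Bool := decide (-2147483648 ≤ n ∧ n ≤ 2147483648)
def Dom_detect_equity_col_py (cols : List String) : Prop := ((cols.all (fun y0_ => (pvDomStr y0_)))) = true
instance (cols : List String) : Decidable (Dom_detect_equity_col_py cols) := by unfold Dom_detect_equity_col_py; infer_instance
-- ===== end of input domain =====

-- B replaces A's two sequential scans with one pass keeping two candidates; alternative decomposition, same cost.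


-- ===== PORT A =====
-- c.lower() in ("equity", "capital", "nav", "portfolio_value", "value")
def pvIsExact (c : String) : Bool :=
  ["equity", "capital", "nav", "portfolio_value", "value"].contains (PySem.Str.lower c)

-- "equity" in c.lower() or "capital" in c.lower() or "nav" in c.lower()
def pvIsSub (c : String) : Bool :=
  PySem.Str.isIn "equity" (PySem.Str.lower c) || PySem.Str.isIn "capital" (PySem.Str.lower c)
    || PySem.Str.isIn "nav" (PySem.Str.lower c)

-- first loop of A (early return)
def pvLoop1 : List String → Option String
  | [] => none
  | c :: rest => if pvIsExact c then some c else pvLoop1 rest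

-- second loop of A (early return)
def pvLoop2 : List String → Option String
  | [] => none
  | c :: rest => if pvIsSub c then some c else pvLoop2 rest

def detect_equity_col_py (cols : List String) : Option String :=
  match pvLoop1 cols with
  | some c => some c
  | none => pvLoop2 cols

-- ===== PORT B =====
-- one pass over cols updating (first_exact, first_substr)
def pvStep (st : Option String × Option String) (c : String) : Option String × Option String :=
  let lc := PySem.Str.lower c
  let fe := if st.1.isNone && ["equity", "capital", "nav", "portfolio_value", "value"].contains lc
            then some c else st.1
  let fs := if st.2.isNone && (PySem.Str.isIn "equity" lc || PySem.Str.isIn "capital" lc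
                                || PySem.Str.isIn "nav" lc)
            then some c else st.2
  (fe, fs)

def detect_equity_col_py_alt (cols : List String) : Option String :=
  let st := cols.foldl pvStep (none, none)
  match st.1 with
  | some c => some c
  | none => st.2

-- ===== PRECONDITION & SPEC =====
def Spec_detect_equity_col_py (cols : List String) (out : Option String) : Prop := out = detect_equity_col_py_alt cols
instance (cols : List String) (out : Option String) : Decidable (Spec_detect_equity_col_py cols out) := by unfold Spec_detect_equity_col_py; infer_instance

-- ===== CLAIM (what is proved, stated in full; the proofs are below) =====
def Claim_equal_detect_equity_col_py : Prop := ∀ (cols : List String), Dom_detect_equity_col_py cols → Spec_detect_equity_col_py cols (detect_equity_col_py cols)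

-- ===== LEMMAS AND PROOFS =====
-- fold invariant: the accumulators hold the earlier candidate if set, else the first match in the rest
theorem pvFold_inv (cols : List String) (e s : Option String) :
    cols.foldl pvStep (e, s)
      = (match e with | some x => some x | none => pvLoop1 cols,
         match s with | some y => some y | none => pvLoop2 cols) := by
  induction cols generalizing e s with
  | nil => cases e <;> cases s <;> simp [pvLoop1, pvLoop2]
  | cons c rest ih =>
    simp only [List.foldl_cons]
    have hstep : pvStep (e, s) c
        = ((if e.isNone && pvIsExact c then some c else e),
           (if s.isNone && pvIsSub c then some c else s)) := by
      simp [pvStep, pvIsExact, pvIsSub]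
    rw [hstep, ih]
    cases e <;> cases s <;> cases he : pvIsExact c <;> cases hs : pvIsSub c <;>
      simp [pvLoop1, pvLoop2, he, hs]

-- ===== VERDICT (by name: the statement is the Claim_ definition above) =====
theorem detect_equity_col_py_spec : Claim_equal_detect_equity_col_py := by
  intro cols _
  show detect_equity_col_py cols = detect_equity_col_py_alt cols
  simp only [detect_equity_col_py, detect_equity_col_py_alt, pvFold_inv]
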